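-- pv_equiv track=rewrite | github.com/tounsi01/besser-schlafen40 | scripts/internal_linking_boost.py | interleave_candidates
-- ===== SOURCE A (Python) =====
-- LINKS_STRESS = [
--     ("schlafprobleme-stress-strategien.html", "Stress und Schlaf: sieben Strategien"),
--     ("stressbedingte-schlafprobleme-ab-40.html", "stressbedingte Schlafprobleme ab 40"),
--     ("job-stress-schlafen-ab-40.html", "Job-Stress und Schlaf ab 40"),
--     ("jobstress-schlafprobleme-ab-40.html", "Jobstress und nächtliche Erschöpfung"),
--     ("gedanken-kreisen-nachts-ab-40.html", "Gedankenkreisen nachts"),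
--     ("schlafstoerung-stress-arbeit.html", "Schlaf und Belastung durch Arbeit"),
--     ("stress-abbauen-schlafen.html", "Stress im Alltag abbauen für den Schlaf"),
--     ("schlecht-schlafen-stress.html", "schlechter Schlaf bei chronischem Stress"),
--     ("nervensystem-beruhigen-schlafen.html", "Nervensystem beruhigen vor dem Schlaf"),
--     ("stress-schlafprobleme-trotz-muedigkeit.html", "müde und trotzdem wach durch Stress"),
-- ]
--
-- LINKS_SLEEP = [
--     ("schlafstoerungen-ab-40.html", "Schlafstörungen ab 40 – Überblick"),
--     ("was-tun-bei-schlafproblemen-leitfaden.html", "Leitfaden bei Schlafproblemen"),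
--     ("durchschlafen-ab-40-tipps.html", "Durchschlafen ab 40: praktische Tipps"),
--     ("durchschlafen-probleme.html", "Schlafzyklen und Durchschlaf-Probleme"),
--     ("warum-wache-ich-nachts-auf-ab-40.html", "nachts aufwachen ab 40"),
--     ("warum-wache-ich-nachts-auf.html", "Aufwachen im Zeitfenster 2–4 Uhr"),
--     ("nachts-aufwachen-nicht-wieder-einschlafen-ab-40.html", "aufwachen und nicht wieder einschlafen"),
--     ("jede-nacht-wach-ab-40.html", "jede Nacht wach liegen"),
--     ("einschlafen-dauert-lange.html", "wenn das Einschlafen lange dauert"),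
--     ("schlechter-schlaf-ab-40-ursachen.html", "Ursachen für schlechten Schlaf ab 40"),
--     ("schlafqualitaet-verbessern.html", "Schlafqualität verstehen und beobachten"),
--     ("besser-schlafen-tipps.html", "kurze Tipps für besseren Schlaf"),
--     ("tiefer-schlaf-verbessern.html", "Tiefschlaf und Schlafqualität verbessern"),
-- ]
--
-- LINKS_MG = [
--     ("welches-magnesium-fuer-schlaf-ab-40.html", "welches Magnesium für den Schlaf ab 40"),
--     ("magnesium-bei-schlafproblemen-wirkung-dosierung.html", "Magnesium: Wirkung und Dosierung"),
--     ("magnesium-nachts-aufwachen-ab-40.html", "Magnesium bei nächtlichem Aufwachen"),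
--     ("welches-magnesium-zum-schlafen.html", "Magnesiumformen und empfindlicher Magen"),
--     ("magnesium-oder-melatonin-schlafprobleme.html", "Magnesium oder Melatonin"),
--     ("magnesium-abends-schlafprobleme-timing.html", "Magnesium abends – Timing"),
--     ("magnesium-schlafen.html", "Magnesiummangel und Schlaf"),
--     ("magnesium-wirkung-schlaf.html", "Studienlage zu Magnesium und Schlaf"),
-- ]
--
-- LINKS_HORMONE = [
--     ("hormonelle-schlafprobleme-ab-40.html", "hormonelle Schlafprobleme ab 40"),
--     ("schlafprobleme-wechseljahre-ursachen-hilfe.html", "Schlaf in den Wechseljahren"),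
--     ("schlafprobleme-hormonell-checkliste.html", "Checkliste hormoneller Schlafstörungen"),
--     ("cortisol-nachts-wach-ab-40.html", "Cortisol und nächtliches Wachsein"),
--     ("cortisol-schlafen-problem.html", "Cortisol-Tagesrhythmus und Schlaf"),
--     ("melatonin-weniger-ab-40-schlaf.html", "Melatonin und älter werden"),
--     ("hormone-schlafstoerung.html", "Hormone und Schlaf – Begriffe"),
--     ("wechseljahre-naechtliches-aufwachen-hilfe.html", "nächtliches Aufwachen in den Wechseljahren"),
-- ]
--
-- def interleave_candidates(
--     current_slug: str, have: set[str]
-- ) -> list[tuple[str, str]]: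
--     """Round-robin across four pools; skip self and slugs already linked on page."""
--     pools = [LINKS_STRESS, LINKS_SLEEP, LINKS_MG, LINKS_HORMONE]
--     picked: list[tuple[str, str]] = []
--     used: set[str] = {current_slug} | have
--     max_rounds = max(len(p) for p in pools) + 5
--     for _round in range(max_rounds):
--         for pool in pools:
--             if _round >= len(pool):
--                 continue
--             slug, anchor = pool[_round]
--             if slug in used:
--                 continue
--             used.add(slug)
--             picked.append((slug, anchor))
--     return picked
-- ===== SOURCE B (Python) =====
-- LINKS_STRESS = [
--     ("schlafprobleme-stress-strategien.html", "Stress und Schlaf: sieben Strategien"),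
--     ("stressbedingte-schlafprobleme-ab-40.html", "stressbedingte Schlafprobleme ab 40"),
--     ("job-stress-schlafen-ab-40.html", "Job-Stress und Schlaf ab 40"),
--     ("jobstress-schlafprobleme-ab-40.html", "Jobstress und nächtliche Erschöpfung"),
--     ("gedanken-kreisen-nachts-ab-40.html", "Gedankenkreisen nachts"),
--     ("schlafstoerung-stress-arbeit.html", "Schlaf und Belastung durch Arbeit"),
--     ("stress-abbauen-schlafen.html", "Stress im Alltag abbauen für den Schlaf"),
--     ("schlecht-schlafen-stress.html", "schlechter Schlaf bei chronischem Stress"),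
--     ("nervensystem-beruhigen-schlafen.html", "Nervensystem beruhigen vor dem Schlaf"),
--     ("stress-schlafprobleme-trotz-muedigkeit.html", "müde und trotzdem wach durch Stress"),
-- ]
--
-- LINKS_SLEEP = [
--     ("schlafstoerungen-ab-40.html", "Schlafstörungen ab 40 – Überblick"),
--     ("was-tun-bei-schlafproblemen-leitfaden.html", "Leitfaden bei Schlafproblemen"),
--     ("durchschlafen-ab-40-tipps.html", "Durchschlafen ab 40: praktische Tipps"),
--     ("durchschlafen-probleme.html", "Schlafzyklen und Durchschlaf-Probleme"),
--     ("warum-wache-ich-nachts-auf-ab-40.html", "nachts aufwachen ab 40"),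
--     ("warum-wache-ich-nachts-auf.html", "Aufwachen im Zeitfenster 2–4 Uhr"),
--     ("nachts-aufwachen-nicht-wieder-einschlafen-ab-40.html", "aufwachen und nicht wieder einschlafen"),
--     ("jede-nacht-wach-ab-40.html", "jede Nacht wach liegen"),
--     ("einschlafen-dauert-lange.html", "wenn das Einschlafen lange dauert"),
--     ("schlechter-schlaf-ab-40-ursachen.html", "Ursachen für schlechten Schlaf ab 40"),
--     ("schlafqualitaet-verbessern.html", "Schlafqualität verstehen und beobachten"),
--     ("besser-schlafen-tipps.html", "kurze Tipps für besseren Schlaf"),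
--     ("tiefer-schlaf-verbessern.html", "Tiefschlaf und Schlafqualität verbessern"),
-- ]
--
-- LINKS_MG = [
--     ("welches-magnesium-fuer-schlaf-ab-40.html", "welches Magnesium für den Schlaf ab 40"),
--     ("magnesium-bei-schlafproblemen-wirkung-dosierung.html", "Magnesium: Wirkung und Dosierung"),
--     ("magnesium-nachts-aufwachen-ab-40.html", "Magnesium bei nächtlichem Aufwachen"),
--     ("welches-magnesium-zum-schlafen.html", "Magnesiumformen und empfindlicher Magen"),
--     ("magnesium-oder-melatonin-schlafprobleme.html", "Magnesium oder Melatonin"),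
--     ("magnesium-abends-schlafprobleme-timing.html", "Magnesium abends – Timing"),
--     ("magnesium-schlafen.html", "Magnesiummangel und Schlaf"),
--     ("magnesium-wirkung-schlaf.html", "Studienlage zu Magnesium und Schlaf"),
-- ]
--
-- LINKS_HORMONE = [
--     ("hormonelle-schlafprobleme-ab-40.html", "hormonelle Schlafprobleme ab 40"),
--     ("schlafprobleme-wechseljahre-ursachen-hilfe.html", "Schlaf in den Wechseljahren"),
--     ("schlafprobleme-hormonell-checkliste.html", "Checkliste hormoneller Schlafstörungen"),
--     ("cortisol-nachts-wach-ab-40.html", "Cortisol und nächtliches Wachsein"),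
--     ("cortisol-schlafen-problem.html", "Cortisol-Tagesrhythmus und Schlaf"),
--     ("melatonin-weniger-ab-40-schlaf.html", "Melatonin und älter werden"),
--     ("hormone-schlafstoerung.html", "Hormone und Schlaf – Begriffe"),
--     ("wechseljahre-naechtliches-aufwachen-hilfe.html", "nächtliches Aufwachen in den Wechseljahren"),
-- ]
--
--
-- def interleave_candidates(
--     current_slug: str, have: set[str]
-- ) -> list[tuple[str, str]]:
--     """Two phases: peel the pool heads round by round into one flat interleaved
--     sequence, then a single filter pass over it with a used set."""
--     pools = [LINKS_STRESS, LINKS_SLEEP, LINKS_MG, LINKS_HORMONE]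
--     flat: list[tuple[str, str]] = []
--     while pools:
--         flat.extend(p[0] for p in pools)
--         pools = [p[1:] for p in pools if len(p) > 1]
--     used = set(have)
--     used.add(current_slug)
--     picked: list[tuple[str, str]] = []
--     for slug, anchor in flat:
--         if slug not in used:
--             used.add(slug)
--             picked.append((slug, anchor))
--     return picked
-- ===== Notes on version B (the rewrite author's own statement) =====
-- stated objective: simpler
-- what changed: B replaces the index-driven nested round loop (with its bounds checks and dead max_rounds+5 padding) by a two-phase decomposition: head-peel the four pools into one flat interleaved list, then one filter pass over it with a used set.
import Mathlib
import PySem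

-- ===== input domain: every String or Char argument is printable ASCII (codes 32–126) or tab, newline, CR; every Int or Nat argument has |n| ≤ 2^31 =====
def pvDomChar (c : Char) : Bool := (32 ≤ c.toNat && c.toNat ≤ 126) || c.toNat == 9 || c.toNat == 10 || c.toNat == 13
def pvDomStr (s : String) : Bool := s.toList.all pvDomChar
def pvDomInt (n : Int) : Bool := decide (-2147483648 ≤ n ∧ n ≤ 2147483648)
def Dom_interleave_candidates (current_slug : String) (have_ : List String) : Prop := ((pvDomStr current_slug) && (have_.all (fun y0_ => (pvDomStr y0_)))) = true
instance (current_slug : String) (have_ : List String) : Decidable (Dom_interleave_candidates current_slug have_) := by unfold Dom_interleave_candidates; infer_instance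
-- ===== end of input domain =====

-- B replaces A's index-driven nested round loop by a two-phase decomposition
-- (head-peel the pools into one flat interleaved list, then one filter pass);
-- objective: simpler.

-- ===== PORT A =====
def pvLINKS_STRESS : List (String × String) := [
  ("schlafprobleme-stress-strategien.html", "Stress und Schlaf: sieben Strategien"),
  ("stressbedingte-schlafprobleme-ab-40.html", "stressbedingte Schlafprobleme ab 40"),
  ("job-stress-schlafen-ab-40.html", "Job-Stress und Schlaf ab 40"),
  ("jobstress-schlafprobleme-ab-40.html", "Jobstress und nächtliche Erschöpfung"),
  ("gedanken-kreisen-nachts-ab-40.html", "Gedankenkreisen nachts"),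
  ("schlafstoerung-stress-arbeit.html", "Schlaf und Belastung durch Arbeit"),
  ("stress-abbauen-schlafen.html", "Stress im Alltag abbauen für den Schlaf"),
  ("schlecht-schlafen-stress.html", "schlechter Schlaf bei chronischem Stress"),
  ("nervensystem-beruhigen-schlafen.html", "Nervensystem beruhigen vor dem Schlaf"),
  ("stress-schlafprobleme-trotz-muedigkeit.html", "müde und trotzdem wach durch Stress")
]

def pvLINKS_SLEEP : List (String × String) := [
  ("schlafstoerungen-ab-40.html", "Schlafstörungen ab 40 – Überblick"),
  ("was-tun-bei-schlafproblemen-leitfaden.html", "Leitfaden bei Schlafproblemen"),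
  ("durchschlafen-ab-40-tipps.html", "Durchschlafen ab 40: praktische Tipps"),
  ("durchschlafen-probleme.html", "Schlafzyklen und Durchschlaf-Probleme"),
  ("warum-wache-ich-nachts-auf-ab-40.html", "nachts aufwachen ab 40"),
  ("warum-wache-ich-nachts-auf.html", "Aufwachen im Zeitfenster 2–4 Uhr"),
  ("nachts-aufwachen-nicht-wieder-einschlafen-ab-40.html", "aufwachen und nicht wieder einschlafen"),
  ("jede-nacht-wach-ab-40.html", "jede Nacht wach liegen"),
  ("einschlafen-dauert-lange.html", "wenn das Einschlafen lange dauert"),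
  ("schlechter-schlaf-ab-40-ursachen.html", "Ursachen für schlechten Schlaf ab 40"),
  ("schlafqualitaet-verbessern.html", "Schlafqualität verstehen und beobachten"),
  ("besser-schlafen-tipps.html", "kurze Tipps für besseren Schlaf"),
  ("tiefer-schlaf-verbessern.html", "Tiefschlaf und Schlafqualität verbessern")
]

def pvLINKS_MG : List (String × String) := [
  ("welches-magnesium-fuer-schlaf-ab-40.html", "welches Magnesium für den Schlaf ab 40"),
  ("magnesium-bei-schlafproblemen-wirkung-dosierung.html", "Magnesium: Wirkung und Dosierung"),
  ("magnesium-nachts-aufwachen-ab-40.html", "Magnesium bei nächtlichem Aufwachen"),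
  ("welches-magnesium-zum-schlafen.html", "Magnesiumformen und empfindlicher Magen"),
  ("magnesium-oder-melatonin-schlafprobleme.html", "Magnesium oder Melatonin"),
  ("magnesium-abends-schlafprobleme-timing.html", "Magnesium abends – Timing"),
  ("magnesium-schlafen.html", "Magnesiummangel und Schlaf"),
  ("magnesium-wirkung-schlaf.html", "Studienlage zu Magnesium und Schlaf")
]

def pvLINKS_HORMONE : List (String × String) := [
  ("hormonelle-schlafprobleme-ab-40.html", "hormonelle Schlafprobleme ab 40"),
  ("schlafprobleme-wechseljahre-ursachen-hilfe.html", "Schlaf in den Wechseljahren"),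
  ("schlafprobleme-hormonell-checkliste.html", "Checkliste hormoneller Schlafstörungen"),
  ("cortisol-nachts-wach-ab-40.html", "Cortisol und nächtliches Wachsein"),
  ("cortisol-schlafen-problem.html", "Cortisol-Tagesrhythmus und Schlaf"),
  ("melatonin-weniger-ab-40-schlaf.html", "Melatonin und älter werden"),
  ("hormone-schlafstoerung.html", "Hormone und Schlaf – Begriffe"),
  ("wechseljahre-naechtliches-aufwachen-hilfe.html", "nächtliches Aufwachen in den Wechseljahren")
]

def interleave_candidates (current_slug : String) (have_ : List String) : List (String × String) :=
  let pools : List (List (String × String)) := [pvLINKS_STRESS, pvLINKS_SLEEP, pvLINKS_MG, pvLINKS_HORMONE]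
  -- used = {current_slug} | have
  let used0 : PySem.Set String := PySem.Set.union (PySem.Set.ofList [current_slug]) (PySem.Set.ofList have_)
  -- max(len(p) for p in pools) + 5; max() of the non-empty constant list: getD 0 is unreachable
  let max_rounds : Int := ((PySem.List.max? (pools.map (fun p => (p.length : Int))) (fun x => x)).getD 0) + 5
  let st := (PySem.List.pyRange 0 max_rounds 1).foldl (fun st r =>
      pools.foldl (fun st pool =>
        if r ≥ (pool.length : Int) then st       -- 'continue'
        else match PySem.List.pyGet? pool r with  -- pool[_round]; in range here, none unreachable
          | none => st
          | some sa =>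
            if PySem.Set.contains st.2 sa.1 then st   -- 'if slug in used: continue'
            else (st.1 ++ [sa], PySem.Set.add st.2 sa.1)) st)
    (([] : List (String × String)), used0)
  st.1

-- ===== PORT B =====
-- pools = [p[1:] for p in pools if len(p) > 1]  (the reassignment in Source B's while loop)
def pvShrink (pools : List (List (String × String))) : List (List (String × String)) :=
  (pools.filter (fun p => 1 < p.length)).map (List.drop 1)

-- termination helper for the while loop of Source B (cited in decreasing_by)
theorem pvShrinkSum_le (pools : List (List (String × String))) :
    ((pvShrink pools).map List.length).sum + (pvShrink pools).length
      ≤ (pools.map List.length).sum := by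
  induction pools with
  | nil => simp [pvShrink]
  | cons p ps ih =>
    by_cases hp : 1 < p.length
    · simp only [pvShrink, List.filter_cons, hp, decide_true, if_true, List.map_cons,
        List.sum_cons, List.length_cons, List.length_drop] at ih ⊢
      omega
    · simp only [pvShrink, List.filter_cons, hp, decide_false, Bool.false_eq_true, if_false,
        List.map_cons, List.sum_cons] at ih ⊢
      omega

-- the 'while pools:' loop of Source B: collect the heads, keep the pools that still
-- have a tail, drop their heads, repeat.  p[0] is ported as head? (the pools kept
-- are always non-empty, so head? = some p[0] exactly); p[1:] is List.drop 1 (exact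
-- for a non-negative start on a list).
def pvPeel (pools : List (List (String × String))) : List (String × String) :=
  if h : pools = [] then []
  else (pools.filterMap List.head?) ++ pvPeel (pvShrink pools)
termination_by (pools.map List.length).sum + pools.length
decreasing_by
  have h1 := pvShrinkSum_le pools
  have h2 : 1 ≤ pools.length := by
    cases pools with
    | nil => exact absurd rfl h
    | cons a l => simp
  omega

def interleave_candidates_alt (current_slug : String) (have_ : List String) : List (String × String) :=
  let flat := pvPeel [pvLINKS_STRESS, pvLINKS_SLEEP, pvLINKS_MG, pvLINKS_HORMONE]
  -- used = set(have); used.add(current_slug)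
  let st := flat.foldl (fun st sa =>
      if PySem.Set.contains st.2 sa.1 then st
      else (st.1 ++ [sa], PySem.Set.add st.2 sa.1))
    (([] : List (String × String)), PySem.Set.add (PySem.Set.ofList have_) current_slug)
  st.1

-- ===== PRECONDITION & SPEC =====
def Spec_interleave_candidates (current_slug : String) (have_ : List String) (out : List (String × String)) : Prop := out = interleave_candidates_alt current_slug have_
instance (current_slug : String) (have_ : List String) (out : List (String × String)) : Decidable (Spec_interleave_candidates current_slug have_ out) := by unfold Spec_interleave_candidates; infer_instance

-- ===== CLAIM (what is proved, stated in full; the proofs are below) =====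
def Claim_equal_interleave_candidates : Prop := ∀ (current_slug : String) (have_ : List String), Dom_interleave_candidates current_slug have_ → Spec_interleave_candidates current_slug have_ (interleave_candidates current_slug have_)

-- ===== LEMMAS AND PROOFS =====

-- the shared step both folds perform on one (slug, anchor) candidate
def pvStep (st : List (String × String) × PySem.Set String) (sa : String × String) :
    List (String × String) × PySem.Set String :=
  if PySem.Set.contains st.2 sa.1 then st
  else (st.1 ++ [sa], PySem.Set.add st.2 sa.1)

-- A's inner per-round fold over the pools = a pvStep fold over the candidates that round yields
theorem pvInner_eq (pools : List (List (String × String))) (r : Int)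
    (st : List (String × String) × PySem.Set String) :
    pools.foldl (fun st pool =>
        if r ≥ (pool.length : Int) then st
        else match PySem.List.pyGet? pool r with
          | none => st
          | some sa =>
            if PySem.Set.contains st.2 sa.1 then st
            else (st.1 ++ [sa], PySem.Set.add st.2 sa.1)) st
      = (pools.filterMap (fun pool =>
          if r ≥ (pool.length : Int) then none else PySem.List.pyGet? pool r)).foldl pvStep st := by
  induction pools generalizing st with
  | nil => rfl
  | cons p ps ih =>
    simp only [List.foldl_cons, List.filterMap_cons]
    by_cases hr : r ≥ (p.length : Int)
    · rw [if_pos hr, if_pos hr]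
      exact ih st
    · rw [if_neg hr, if_neg hr]
      cases hg : PySem.List.pyGet? p r with
      | none => exact ih st
      | some sa => rw [ih]; rfl

-- A's outer fold over rounds = a pvStep fold over the flattened candidate list
theorem pvNested_eq (pools : List (List (String × String))) (rounds : List Int)
    (st : List (String × String) × PySem.Set String) :
    rounds.foldl (fun st r =>
        pools.foldl (fun st pool =>
          if r ≥ (pool.length : Int) then st
          else match PySem.List.pyGet? pool r with
            | none => st
            | some sa =>
              if PySem.Set.contains st.2 sa.1 then st
              else (st.1 ++ [sa], PySem.Set.add st.2 sa.1)) st) st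
      = (rounds.flatMap (fun r => pools.filterMap (fun pool =>
          if r ≥ (pool.length : Int) then none else PySem.List.pyGet? pool r))).foldl pvStep st := by
  induction rounds generalizing st with
  | nil => rfl
  | cons r rs ih =>
    simp only [List.foldl_cons, List.flatMap_cons, List.foldl_append]
    rw [pvInner_eq, ih]

-- unfolding steps of pvPeel (pvPeel is well-founded recursion, so it is unfolded
-- through its equation lemma, one round at a time)
theorem pvPeel_nil : pvPeel [] = [] := by simp [pvPeel]

theorem pvPeel_cons (p : List (String × String)) (ps : List (List (String × String))) :
    pvPeel (p :: ps) = ((p :: ps).filterMap List.head?) ++ pvPeel (pvShrink (p :: ps)) := by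
  rw [pvPeel]
  simp

-- on the concrete pools, A's flattened traversal order is exactly B's peeled list
set_option maxRecDepth 10000 in
theorem pvFlat_eq :
    ((PySem.List.pyRange 0 (((PySem.List.max? ([pvLINKS_STRESS, pvLINKS_SLEEP, pvLINKS_MG, pvLINKS_HORMONE].map (fun p => (p.length : Int))) (fun x => x)).getD 0) + 5) 1).flatMap
        (fun r => [pvLINKS_STRESS, pvLINKS_SLEEP, pvLINKS_MG, pvLINKS_HORMONE].filterMap (fun pool =>
          if r ≥ (pool.length : Int) then none else PySem.List.pyGet? pool r)))
      = pvPeel [pvLINKS_STRESS, pvLINKS_SLEEP, pvLINKS_MG, pvLINKS_HORMONE] := by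
  simp [pvPeel_cons, pvPeel_nil, pvShrink, pvLINKS_STRESS, pvLINKS_SLEEP, pvLINKS_MG, pvLINKS_HORMONE]
  decide

-- a pvStep fold only consults the used set through membership: equal picked lists
-- and membership-equivalent used sets give equal picked lists
theorem pvFold_congr (l : List (String × String))
    (st₁ st₂ : List (String × String) × PySem.Set String)
    (hp : st₁.1 = st₂.1) (hs : ∀ x, x ∈ st₁.2 ↔ x ∈ st₂.2) :
    (l.foldl pvStep st₁).1 = (l.foldl pvStep st₂).1 := by
  induction l generalizing st₁ st₂ with
  | nil => exact hp
  | cons sa t ih =>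
    simp only [List.foldl_cons]
    by_cases hm : sa.1 ∈ st₁.2
    · have hm₂ : sa.1 ∈ st₂.2 := (hs sa.1).mp hm
      have h₁ : PySem.Set.contains st₁.2 sa.1 = true := (PySem.Set.contains_iff _ _).mpr hm
      have h₂ : PySem.Set.contains st₂.2 sa.1 = true := (PySem.Set.contains_iff _ _).mpr hm₂
      simp only [pvStep, h₁, h₂, if_true]
      exact ih st₁ st₂ hp hs
    · have hm₂ : sa.1 ∉ st₂.2 := fun h => hm ((hs sa.1).mpr h)
      have h₁ : PySem.Set.contains st₁.2 sa.1 = false := by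
        simpa using fun h => hm ((PySem.Set.contains_iff _ _).mp h)
      have h₂ : PySem.Set.contains st₂.2 sa.1 = false := by
        simpa using fun h => hm₂ ((PySem.Set.contains_iff _ _).mp h)
      simp only [pvStep, h₁, h₂, Bool.false_eq_true, if_false]
      refine ih _ _ (by simp [hp]) ?_
      intro x
      simp only [PySem.Set.mem_add]
      exact or_congr (hs x) Iff.rfl

-- ===== VERDICT (by name: the statement is the Claim_ definition above) =====
theorem interleave_candidates_spec : Claim_equal_interleave_candidates := by
  intro current_slug have_ _
  unfold Spec_interleave_candidates interleave_candidates interleave_candidates_alt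
  simp only [pvNested_eq, pvFlat_eq]
  apply pvFold_congr
  · rfl
  · intro x
    simp [PySem.Set.mem_union, PySem.Set.mem_ofList, PySem.Set.mem_add]
    tauto
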